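-- pv_equiv track=rewrite | github.com/tahmid-kazi/nc | python_for_coding_interviews/6.hash_maps_sets/24.defaultdict.py | nested_list_to_dict
-- ===== SOURCE A (Python) =====
-- from collections import defaultdict
-- from typing import List, Dict
--
-- def nested_list_to_dict(nums: List[List[int]]) -> Dict[int, List[int]]:
--     hashmap = defaultdict(list)
--     for i in nums:
--         if i[0] in hashmap:
--             hashmap[i[0]].extend(i[1:])
--         else:
--             hashmap[i[0]] = i[1:]
--     return hashmap
-- ===== SOURCE B (Python) =====
-- from collections import defaultdict
-- from typing import List, Dict
--
-- def nested_list_to_dict(nums: List[List[int]]) -> Dict[int, List[int]]: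
--     keys = []
--     for row in nums:
--         if row[0] not in keys:
--             keys.append(row[0])
--     return defaultdict(list, {k: [x for row in nums if row[0] == k for x in row[1:]] for k in keys})
-- ===== Notes on version B (the rewrite author's own statement) =====
-- stated objective: alternative
-- what changed: A builds the dict in one pass mutating values in place; B first collects the keys in first-occurrence order, then builds each value independently by one comprehension that concatenates the tails of all rows with that key.
import Mathlib
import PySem

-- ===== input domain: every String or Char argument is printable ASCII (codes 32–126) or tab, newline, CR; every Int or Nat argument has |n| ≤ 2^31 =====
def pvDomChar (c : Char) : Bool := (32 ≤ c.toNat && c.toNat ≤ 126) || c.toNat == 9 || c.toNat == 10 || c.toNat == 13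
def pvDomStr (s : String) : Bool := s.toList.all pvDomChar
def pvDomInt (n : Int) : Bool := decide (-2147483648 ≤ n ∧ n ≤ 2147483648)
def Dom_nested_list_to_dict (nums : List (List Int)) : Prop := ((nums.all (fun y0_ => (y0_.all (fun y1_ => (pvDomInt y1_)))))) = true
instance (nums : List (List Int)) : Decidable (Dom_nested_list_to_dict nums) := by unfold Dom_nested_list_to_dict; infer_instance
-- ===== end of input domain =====

-- B replaces A's single-pass dict-mutation loop by a key-collection pass followed by one
-- per-key concatenation of row tails (objective: alternative decomposition, same results).

-- ===== PORT A =====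
-- row[0]: IndexError on an empty row is excluded by Pre_; the .getD 0 default is never
-- reached on inputs satisfying Pre_ (pyGet? is some on nonempty rows).
def pvHead (i : List Int) : Int := (PySem.List.pyGet? i 0).getD 0

def nested_list_to_dict (nums : List (List Int)) : List (Int × List Int) :=
  (nums.foldl
    (fun h i =>
      if h.contains (pvHead i) then
        -- hashmap[i[0]].extend(i[1:])
        h.insert (pvHead i) (h.getD (pvHead i) [] ++ PySem.List.slice i (some 1) none)
      else
        -- hashmap[i[0]] = i[1:]
        h.insert (pvHead i) (PySem.List.slice i (some 1) none))
    (PySem.Dict.empty : PySem.Dict Int (List Int))).items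

-- ===== PORT B =====
-- keys in first-occurrence order ('if row[0] not in keys: keys.append(row[0])')
def pvKeysB (nums : List (List Int)) : List Int :=
  nums.foldl (fun ks row => PySem.Set.add ks (pvHead row)) PySem.Set.empty

-- [x for row in nums if row[0] == k for x in row[1:]]
def pvGroupB (nums : List (List Int)) (k : Int) : List Int :=
  nums.flatMap (fun row => if pvHead row == k then PySem.List.slice row (some 1) none else [])

def nested_list_to_dict_alt (nums : List (List Int)) : List (Int × List Int) :=
  (pvKeysB nums).map (fun k => (k, pvGroupB nums k))

-- ===== PRECONDITION & SPEC =====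
-- Pre_ excludes inputs containing an empty row: there Python A (and Python B) raises IndexError on row[0].
def Pre_nested_list_to_dict (nums : List (List Int)) : Prop := ∀ row ∈ nums, row ≠ []
instance (nums : List (List Int)) : Decidable (Pre_nested_list_to_dict nums) := by
  unfold Pre_nested_list_to_dict; infer_instance
def pvWitness_nested_list_to_dict : List (List Int) := [[1, 2], [3], [1, 4, 5], [3, 6]]

def Spec_nested_list_to_dict (nums : List (List Int)) (out : List (Int × List Int)) : Prop := out = nested_list_to_dict_alt nums
instance (nums : List (List Int)) (out : List (Int × List Int)) : Decidable (Spec_nested_list_to_dict nums out) := by unfold Spec_nested_list_to_dict; infer_instance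

-- ===== CLAIM (what is proved, stated in full; the proofs are below) =====
def Claim_equal_nested_list_to_dict : Prop := ∀ (nums : List (List Int)), Dom_nested_list_to_dict nums → Pre_nested_list_to_dict nums → Spec_nested_list_to_dict nums (nested_list_to_dict nums)

-- ===== LEMMAS AND PROOFS =====

-- the uniform step: both branches of A's loop are one insert of (old value ++ tail)
def pvStepF (h : PySem.Dict Int (List Int)) (i : List Int) : PySem.Dict Int (List Int) :=
  h.insert (pvHead i) (h.getD (pvHead i) [] ++ PySem.List.slice i (some 1) none)

lemma pvFold_eq (nums : List (List Int)) (e : PySem.Dict Int (List Int)) :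
    nums.foldl
      (fun h i =>
        if h.contains (pvHead i) then
          h.insert (pvHead i) (h.getD (pvHead i) [] ++ PySem.List.slice i (some 1) none)
        else
          h.insert (pvHead i) (PySem.List.slice i (some 1) none))
      e = nums.foldl pvStepF e := by
  induction nums generalizing e with
  | nil => rfl
  | cons i rest ih =>
    simp only [List.foldl_cons]
    have hstep :
        (if e.contains (pvHead i) then
          e.insert (pvHead i) (e.getD (pvHead i) [] ++ PySem.List.slice i (some 1) none)
        else
          e.insert (pvHead i) (PySem.List.slice i (some 1) none)) = pvStepF e i := by
      unfold pvStepF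
      by_cases hc : e.contains (pvHead i) = true
      · simp [hc]
      · have h0 : e.getD (pvHead i) [] = [] := by
          apply PySem.Dict.getD_of_not_contains
          simpa using hc
        simp [hc, h0]
    rw [hstep, ih]

lemma pvFold_keys (nums : List (List Int)) :
    (nums.foldl pvStepF (PySem.Dict.empty : PySem.Dict Int (List Int))).keys = pvKeysB nums := by
  unfold pvStepF pvKeysB
  rw [PySem.Dict.keys_foldl_insert_key nums pvHead _ _]
  rw [← PySem.Set.update_map_eq_foldl_add]
  simp [PySem.Dict.keys_empty, PySem.Set.empty]

lemma pvFold_nodup (nums : List (List Int)) :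
    (nums.foldl pvStepF (PySem.Dict.empty : PySem.Dict Int (List Int))).keys.Nodup := by
  unfold pvStepF
  exact PySem.Dict.nodup_keys_foldl_insert_key nums pvHead _ _ (by simp [PySem.Dict.keys_empty])

lemma pvStepF_getD (d : PySem.Dict Int (List Int)) (i : List Int) (k : Int) :
    (pvStepF d i).getD k [] =
      if k = pvHead i then d.getD (pvHead i) [] ++ PySem.List.slice i (some 1) none
      else d.getD k [] := by
  unfold pvStepF
  rw [PySem.Dict.getD_insert]

lemma pvFold_getD (nums : List (List Int)) (k : Int) :
    (nums.foldl pvStepF (PySem.Dict.empty : PySem.Dict Int (List Int))).getD k [] = pvGroupB nums k := by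
  induction nums using List.reverseRecOn with
  | nil => simp [pvGroupB, PySem.Dict.getD_empty]
  | append_singleton ns i ih =>
    rw [List.foldl_append, List.foldl_cons, List.foldl_nil, pvStepF_getD]
    unfold pvGroupB at ih ⊢
    rw [List.flatMap_append]
    simp only [List.flatMap_cons, List.flatMap_nil, List.append_nil]
    by_cases hk : k = pvHead i
    · subst hk
      rw [if_pos rfl, ih]
      simp
    · have hne : (pvHead i == k) = false := by simp [Ne.symm hk]
      rw [if_neg hk, ih, hne]
      simp

-- ===== VERDICT (by name: the statement is the Claim_ definition above) =====
theorem nested_list_to_dict_spec : Claim_equal_nested_list_to_dict := by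
  intro nums _ _
  unfold Spec_nested_list_to_dict nested_list_to_dict nested_list_to_dict_alt
  rw [pvFold_eq]
  rw [PySem.Dict.items_eq_map_keys _ (pvFold_nodup nums) []]
  rw [pvFold_keys]
  exact List.map_congr_left fun k _ => by rw [pvFold_getD]
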